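-- pv_equiv track=rewrite | github.com/piyush-khanna-qmb/Project-MNC | codevita/sportsDay.py | findEffi
-- ===== SOURCE A (Python) =====
-- def findEffi(nums):
--     nums.sort()
--
--     n = len(nums)
--
--     maxi = 0
--
--     for i in range(n):
--         effi = 0
--         for j in range(i, n):
--             effi += nums[j] * (j - i + 1)
--         maxi = max(maxi, effi)
--
--     return maxi
-- ===== SOURCE B (Python) =====
-- def findEffi(nums):
--     # Single backward pass over the sorted list: suf = sum of the current
--     # suffix, effi = weighted sum of the current suffix (weight = 1-based
--     # position within the suffix); effi(i) = effi(i+1) + suf(i).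
--     # Note: A sorts its argument in place; B leaves it untouched (return
--     # value is identical).
--     s = sorted(nums)
--     suf = 0
--     effi = 0
--     maxi = 0
--     for x in reversed(s):
--         suf += x
--         effi += suf
--         if maxi < effi:
--             maxi = effi
--     return maxi
-- ===== Notes on version B (the rewrite author's own statement) =====
-- stated objective: faster
-- what changed: Replaces the quadratic double loop (recomputing each weighted suffix sum from scratch) with one backward pass maintaining the running suffix sum and the recurrence effi(i) = effi(i+1) + suffixSum(i).
import Mathlib
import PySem

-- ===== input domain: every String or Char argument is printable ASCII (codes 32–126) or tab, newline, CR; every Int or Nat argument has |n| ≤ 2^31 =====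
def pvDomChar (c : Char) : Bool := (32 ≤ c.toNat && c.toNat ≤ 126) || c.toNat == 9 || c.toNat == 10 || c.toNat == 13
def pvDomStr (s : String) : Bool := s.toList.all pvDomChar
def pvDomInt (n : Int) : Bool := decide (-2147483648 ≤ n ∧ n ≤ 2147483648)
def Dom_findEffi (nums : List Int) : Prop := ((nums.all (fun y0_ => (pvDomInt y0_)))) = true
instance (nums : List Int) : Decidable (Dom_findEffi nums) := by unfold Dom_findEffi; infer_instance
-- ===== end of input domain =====

-- B replaces A's quadratic double loop by a single backward pass (effi(i) = effi(i+1) + suffixSum(i));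
-- equality is about the RETURN value only: A sorts its argument in place, B does not mutate it.

-- ===== PORT A =====
def findEffi (nums : List Int) : Int :=
  let s := PySem.List.sorted nums (fun x => x) false
  let n : Int := PySem.List.len s
  (PySem.List.pyRange 0 n 1).foldl (fun maxi i =>
    let effi := (PySem.List.pyRange i n 1).foldl
      (fun effi j => effi + PySem.List.pyGetD s j 0 * (j - i + 1)) 0
    max maxi effi) 0

-- ===== PORT B =====
def findEffi_alt (nums : List Int) : Int :=
  let s := PySem.List.sorted nums (fun x => x) false
  (s.reverse.foldl
    (fun (st : Int × Int × Int) x =>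
      let suf := st.1 + x
      let effi := st.2.1 + suf
      (suf, effi, if st.2.2 < effi then effi else st.2.2)) (0, 0, 0)).2.2

-- ===== PRECONDITION & SPEC =====
def Spec_findEffi (nums : List Int) (out : Int) : Prop := out = findEffi_alt nums
instance (nums : List Int) (out : Int) : Decidable (Spec_findEffi nums out) := by unfold Spec_findEffi; infer_instance

-- ===== CLAIM (what is proved, stated in full; the proofs are below) =====
def Claim_equal_findEffi : Prop := ∀ (nums : List Int), Dom_findEffi nums → Spec_findEffi nums (findEffi nums)

-- ===== LEMMAS AND PROOFS =====

/-- Weighted suffix sum: `Ew t = Σ t[k] * (k+1)`. -/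
def Ew : List Int → Int
  | [] => 0
  | x :: t => x + t.sum + Ew t

/-- Running max (from 0) of `Ew` over all suffixes of `t`. -/
def Mw : List Int → Int
  | [] => 0
  | x :: t => max (Ew (x :: t)) (Mw t)

lemma Mw_nonneg (t : List Int) : 0 ≤ Mw t := by
  induction t with
  | nil => simp [Mw]
  | cons x r ih => simp [Mw]; right; exact ih

/-- A's inner loop values, summed: the weighted sum over `range(|p|, |s|)` with weight
offset `c` is `Ew t + c * t.sum` for the suffix `t` of `s = p ++ t`. -/
lemma innerA (t : List Int) : ∀ (p s : List Int), s = p ++ t → ∀ (c : Int),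
    ((PySem.List.pyRange (p.length : Int) (s.length : Int) 1).map
      (fun j => PySem.List.pyGetD s j 0 * (j - (p.length : Int) + 1 + c))).sum
    = Ew t + c * t.sum := by
  induction t with
  | nil =>
    intro p s hs c
    rw [PySem.List.pyRange_one_eq_nil (by simp [hs])]
    simp [Ew]
  | cons x r ih =>
    intro p s hs c
    have hlt : (p.length : Int) < (s.length : Int) := by simp [hs]
    rw [PySem.List.pyRange_one_cons hlt, List.map_cons, List.sum_cons]
    have hx : PySem.List.pyGetD s (p.length : Int) 0 = x := by
      simp [hs, PySem.List.pyGetD_natCast, List.getD]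
    have hfun : (fun j => PySem.List.pyGetD s j 0 * (j - (p.length : Int) + 1 + c))
        = (fun j => PySem.List.pyGetD s j 0 * (j - ((p ++ [x]).length : Int) + 1 + (c + 1))) := by
      funext j
      have hl : (((p ++ [x]).length : Nat) : Int) = (p.length : Int) + 1 := by simp
      rw [hl]; ring
    have hstart : (p.length : Int) + 1 = ((p ++ [x]).length : Int) := by simp
    rw [hfun, hstart, ih (p ++ [x]) s (by simp [hs]) (c + 1)]
    rw [hx]
    simp [Ew, List.sum_cons]
    ring

/-- A's outer loop is a running max of `Ew` over the suffixes of `s`. -/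
lemma outerA (t : List Int) : ∀ (p s : List Int), s = p ++ t → ∀ (m : Int), 0 ≤ m →
    (PySem.List.pyRange (p.length : Int) (s.length : Int) 1).foldl
      (fun acc i => max acc (Ew (s.drop i.toNat))) m = max m (Mw t) := by
  induction t with
  | nil =>
    intro p s hs m hm
    rw [PySem.List.pyRange_one_eq_nil (by simp [hs])]
    simp [Mw]
    omega
  | cons x r ih =>
    intro p s hs m hm
    have hlt : (p.length : Int) < (s.length : Int) := by simp [hs]
    rw [PySem.List.pyRange_one_cons hlt, List.foldl_cons]
    have hdrop : s.drop ((p.length : Int)).toNat = x :: r := by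
      simp [hs]
    have hstart : (p.length : Int) + 1 = ((p ++ [x]).length : Int) := by simp
    rw [hdrop, hstart, ih (p ++ [x]) s (by simp [hs]) _ (le_trans hm (le_max_left _ _))]
    rw [show Mw (x :: r) = max (Ew (x :: r)) (Mw r) from rfl, ← max_assoc]

/-- B's backward pass computes `(sum, Ew, Mw)`. -/
lemma loopB (l : List Int) :
    l.reverse.foldl
      (fun (st : Int × Int × Int) x =>
        let suf := st.1 + x
        let effi := st.2.1 + suf
        (suf, effi, if st.2.2 < effi then effi else st.2.2)) (0, 0, 0)
    = (l.sum, Ew l, Mw l) := by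
  rw [List.foldl_reverse]
  induction l with
  | nil => simp [Ew, Mw]
  | cons x r ih =>
    simp only [List.foldr_cons, ih, List.sum_cons, Ew, Mw]
    refine Prod.ext (by ring) (Prod.ext (by ring) ?_)
    simp only [max_def]
    split_ifs <;> omega

/-- A's port equals `Mw` of the sorted list. -/
lemma portA_eq (s : List Int) :
    (PySem.List.pyRange 0 (s.length : Int) 1).foldl (fun maxi i =>
      let effi := (PySem.List.pyRange i (s.length : Int) 1).foldl
        (fun effi j => effi + PySem.List.pyGetD s j 0 * (j - i + 1)) 0
      max maxi effi) 0 = Mw s := by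
  have hcong : (PySem.List.pyRange 0 (s.length : Int) 1).foldl (fun maxi i =>
      let effi := (PySem.List.pyRange i (s.length : Int) 1).foldl
        (fun effi j => effi + PySem.List.pyGetD s j 0 * (j - i + 1)) 0
      max maxi effi) 0
      = (PySem.List.pyRange 0 (s.length : Int) 1).foldl
        (fun acc i => max acc (Ew (s.drop i.toNat))) 0 := by
    apply PySem.List.foldl_congr_mem
    intro acc i hi
    obtain ⟨h0, hn⟩ := PySem.List.mem_pyRange_one.mp hi
    have hlen : ((s.take i.toNat).length : Int) = i := by
      simp [List.length_take]; omega
    have := innerA (s.drop i.toNat) (s.take i.toNat) s (List.take_append_drop _ _).symm 0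
    rw [hlen] at this
    simp only [PySem.List.foldl_add, zero_add]
    simp only [add_zero, zero_mul, add_zero] at this ⊢
    rw [this]
  rw [hcong]
  have := outerA s [] s rfl 0 le_rfl
  simp only [List.length_nil, Nat.cast_zero] at this
  rw [this, max_eq_right (Mw_nonneg s)]

-- ===== VERDICT (by name: the statement is the Claim_ definition above) =====
theorem findEffi_spec : Claim_equal_findEffi := by
  intro nums _
  unfold Spec_findEffi findEffi findEffi_alt
  simp only [PySem.List.len_eq]
  rw [loopB, portA_eq]
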